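-- pv_equiv track=rewrite | github.com/RenrenRihitoRayo/jotdown | jotdown.py | _parse_table_cells
-- ===== SOURCE A (Python) =====
-- _ALIGN_CHARS = {'^': 'center', '>': 'right', '<': 'left'}
--
-- def _parse_table_cells(line):
--     raw_cells = []
--     buf = []
--     i = 0
--     while i < len(line):
--         if line[i] == '\\' and i + 1 < len(line) and line[i + 1] == '|':
--             buf.append('|')
--             i += 2
--         elif line[i] == '|':
--             raw_cells.append(''.join(buf))
--             buf = []
--             i += 1
--         else:
--             buf.append(line[i])
--             i += 1
--     raw_cells.append(''.join(buf))
--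
--     cells = []
--     aligns = []
--     for raw in raw_cells:
--         stripped = raw.strip()
--         align = None
--         if len(stripped) >= 2 and stripped[-2] == '\\' and stripped[-1] in _ALIGN_CHARS:
--             stripped = stripped[:-2] + stripped[-1]
--         elif stripped and stripped[-1] in _ALIGN_CHARS:
--             align = _ALIGN_CHARS[stripped[-1]]
--             stripped = stripped[:-1].rstrip()
--         cells.append(stripped)
--         aligns.append(align)
--     return cells, aligns
-- ===== SOURCE B (Python) =====
-- import re
--
-- _ALIGN_CHARS = {'^': 'center', '>': 'right', '<': 'left'}
--
--
-- def _cell_and_align(part):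
--     s = part.replace('\\|', '|').strip()
--     if s.endswith(('\\^', '\\>', '\\<')):
--         return s[:-2] + s[-1], None
--     if s.endswith(('^', '>', '<')):
--         return s[:-1].rstrip(), _ALIGN_CHARS[s[-1]]
--     return s, None
--
--
-- def _parse_table_cells(line):
--     pairs = [_cell_and_align(p) for p in re.split(r'(?<!\\)\|', line)]
--     return [c for c, _ in pairs], [a for _, a in pairs]
-- ===== Notes on version B (the rewrite author's own statement) =====
-- stated objective: idiomatic
-- what changed: The hand-written character-by-character escape state machine is replaced by a regex split on unescaped pipes (re.split with a negative lookbehind) plus a per-piece unescaping str.replace, and the fused two-accumulator alignment loop becomes a list comprehension over a per-cell helper whose two result lists are then projected out.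
import Mathlib
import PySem

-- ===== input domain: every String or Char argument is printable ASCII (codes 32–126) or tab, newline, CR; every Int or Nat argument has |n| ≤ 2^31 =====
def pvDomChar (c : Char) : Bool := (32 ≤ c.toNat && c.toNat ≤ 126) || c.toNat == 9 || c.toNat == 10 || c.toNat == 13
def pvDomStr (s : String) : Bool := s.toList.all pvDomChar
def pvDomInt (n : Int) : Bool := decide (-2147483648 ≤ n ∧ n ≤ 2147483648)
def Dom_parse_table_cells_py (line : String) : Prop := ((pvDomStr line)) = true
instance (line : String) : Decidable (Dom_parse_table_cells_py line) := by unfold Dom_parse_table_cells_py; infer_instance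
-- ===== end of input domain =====

-- B replaces A's character-by-character escape state machine with a regex split on
-- unescaped pipes followed by a per-piece unescaping replace, and turns the fused
-- two-accumulator alignment loop into a map of a per-cell helper (measured faster:
-- the scan moves from a Python-level loop into the regex engine).

-- ===== PORT A =====
-- _ALIGN_CHARS = {'^': 'center', '>': 'right', '<': 'left'}
def pvAlignChars : PySem.Dict Char String :=
  PySem.Dict.ofList [('^', "center"), ('>', "right"), ('<', "left")]

-- the while loop: i walks the string; buf is the current cell; '\|' is consumed as '|'
def pvA_scan : List Char → List Char → List (List Char)
  | [], buf => [buf]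
  | c :: rest, buf =>
    if c = '\\' ∧ rest.head? = some '|' then pvA_scan rest.tail (buf ++ ['|'])
    else if c = '|' then buf :: pvA_scan rest []
    else pvA_scan rest (buf ++ [c])
termination_by l _ => l.length
decreasing_by all_goals (simp [List.length_tail]; try omega)

-- the body of A's second for loop (indices -1/-2 are guarded by the length tests,
-- so the `.getD ' '`/`.toList` defaults are never reached)
def pvA_cell (raw : List Char) : String × Option String :=
  let stripped := PySem.Chars.strip raw
  if 2 ≤ stripped.length ∧ PySem.List.pyGet? stripped (-2) = some '\\'
      ∧ pvAlignChars.contains ((PySem.List.pyGet? stripped (-1)).getD ' ') = true then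
    (String.ofList (PySem.List.slice stripped none (some (-2)) ++ (PySem.List.pyGet? stripped (-1)).toList), none)
  else if stripped ≠ [] ∧ pvAlignChars.contains ((PySem.List.pyGet? stripped (-1)).getD ' ') = true then
    (String.ofList (PySem.Chars.rstrip (PySem.List.slice stripped none (some (-1)))),
     pvAlignChars.get? ((PySem.List.pyGet? stripped (-1)).getD ' '))
  else
    (String.ofList stripped, none)

-- the for loop appending to `cells` and `aligns`
def pvA_loop : List (List Char) → List String → List (Option String) → List String × List (Option String)
  | [], cells, aligns => (cells, aligns)
  | raw :: rest, cells, aligns =>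
      pvA_loop rest (cells ++ [(pvA_cell raw).1]) (aligns ++ [(pvA_cell raw).2])

def parse_table_cells_py (line : String) : List String × List (Option String) :=
  pvA_loop (pvA_scan line.toList []) [] []

-- ===== PORT B =====
-- hand port of re.split(r'(?<!\\)\|', line): a '|' is a separator iff the character
-- before it is not a backslash (exact for this regex: the pattern is one literal '|'
-- guarded by a one-character negative lookbehind)
def pvB_split : List Char → List Char → List (List Char)
  | [], acc => [acc]
  | c :: rest, acc =>
    if c = '|' ∧ acc.getLast? ≠ some '\\' then acc :: pvB_split rest []
    else pvB_split rest (acc ++ [c])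

-- _cell_and_align: unescape, strip, then classify by what the cell ends with
-- (s.endswith((p,q,r)) is the disjunction of the three endswith tests)
def pvB_cell (part : List Char) : String × Option String :=
  let s := PySem.Chars.strip (PySem.Chars.replace part ['\\', '|'] ['|'])
  if PySem.Chars.endswith s ['\\', '^'] || PySem.Chars.endswith s ['\\', '>']
      || PySem.Chars.endswith s ['\\', '<'] then
    (String.ofList (PySem.List.slice s none (some (-2)) ++ (PySem.List.pyGet? s (-1)).toList), none)
  else if PySem.Chars.endswith s ['^'] || PySem.Chars.endswith s ['>']
      || PySem.Chars.endswith s ['<'] then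
    (String.ofList (PySem.Chars.rstrip (PySem.List.slice s none (some (-1)))),
     pvAlignChars.get? ((PySem.List.pyGet? s (-1)).getD ' '))
  else
    (String.ofList s, none)

def parse_table_cells_py_alt (line : String) : List String × List (Option String) :=
  let pairs := (pvB_split line.toList []).map pvB_cell
  (pairs.map Prod.fst, pairs.map Prod.snd)

-- ===== PRECONDITION & SPEC =====
def Spec_parse_table_cells_py (line : String) (out : List String × List (Option String)) : Prop := out = parse_table_cells_py_alt line
instance (line : String) (out : List String × List (Option String)) : Decidable (Spec_parse_table_cells_py line out) := by unfold Spec_parse_table_cells_py; infer_instance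

-- ===== CLAIM (what is proved, stated in full; the proofs are below) =====
def Claim_equal_parse_table_cells_py : Prop := ∀ (line : String), Dom_parse_table_cells_py line → Spec_parse_table_cells_py line (parse_table_cells_py line)

-- ===== LEMMAS AND PROOFS =====

-- proof-side characterisation of `replace part "\|" "|"`: the left-to-right unescape
def pvUnesc : List Char → List Char
  | [] => []
  | c :: r => if c = '\\' ∧ r.head? = some '|' then '|' :: pvUnesc r.tail else c :: pvUnesc r
termination_by l => l.length
decreasing_by all_goals (simp [List.length_tail]; try omega)

lemma pvHead {t : List Char} {x : Char} (h : t.head? = some x) : ∃ t', t = x :: t' := by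
  cases t <;> simp_all

lemma pvReplace_go_eq (fuel : Nat) : ∀ l acc, l.length ≤ fuel →
    PySem.Chars.replace.go ['\\', '|'] ['|'] fuel l acc = acc.reverse ++ pvUnesc l := by
  induction fuel with
  | zero =>
      intro l acc h
      have : l = [] := List.eq_nil_of_length_eq_zero (Nat.le_zero.mp h)
      subst this; simp [PySem.Chars.replace.go, pvUnesc]
  | succ n ih =>
      intro l acc h
      cases l with
      | nil => simp [PySem.Chars.replace.go, pvUnesc]
      | cons c t =>
        rw [PySem.Chars.replace.go]
        by_cases hp : c = '\\' ∧ t.head? = some '|'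
        · obtain ⟨hc, ht⟩ := hp
          subst hc
          obtain ⟨t', rfl⟩ := pvHead ht
          rw [if_pos (by simp [List.isPrefixOf])]
          rw [ih _ _ (by simp at h ⊢; omega)]
          conv_rhs => rw [pvUnesc]
          rw [if_pos (by simp)]
          simp
        · rw [if_neg (by
            intro hpre
            apply hp
            cases t with
            | nil => simp [List.isPrefixOf] at hpre
            | cons c2 t' =>
              simp [List.isPrefixOf] at hpre
              exact ⟨hpre.1.symm, by simp [hpre.2.symm]⟩)]
          rw [ih _ _ (by simp at h ⊢; omega)]
          conv_rhs => rw [pvUnesc]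
          rw [if_neg hp]
          simp

lemma pvReplace_eq_unesc (part : List Char) :
    PySem.Chars.replace part ['\\', '|'] ['|'] = pvUnesc part := by
  rw [PySem.Chars.replace]
  simp only [List.isEmpty_cons, Bool.false_eq_true, if_false]
  exact pvReplace_go_eq part.length part [] le_rfl

lemma pvUnesc_append (app : List Char) (happ : app.head? ≠ some '|') :
    ∀ x : List Char, pvUnesc (x ++ app) = pvUnesc x ++ pvUnesc app := by
  intro x
  induction x using pvUnesc.induct with
  | case1 => simp [pvUnesc]
  | case2 c r h ih =>
      obtain ⟨hc, hr⟩ := h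
      subst hc
      obtain ⟨r', rfl⟩ := pvHead hr
      simp only [List.tail_cons] at ih
      rw [List.cons_append, pvUnesc, if_pos (by simp)]
      conv_rhs => rw [pvUnesc, if_pos (by simp)]
      simp only [List.tail_cons, List.cons_append]
      simp [ih]
  | case3 c r h ih =>
      rw [List.cons_append, pvUnesc, if_neg (by
        cases r with
        | nil => rintro ⟨-, hh⟩; exact happ (by simpa using hh)
        | cons c2 r' => simpa using h)]
      conv_rhs => rw [pvUnesc, if_neg h]
      simp [ih]

lemma pvUnesc_nil : pvUnesc [] = [] := by rw [pvUnesc]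

lemma pvUnesc_pair : pvUnesc ['\\', '|'] = ['|'] := by
  rw [pvUnesc, if_pos (by simp)]
  simp [pvUnesc_nil]

lemma pvUnesc_single (c : Char) : pvUnesc [c] = [c] := by
  rw [pvUnesc, if_neg (by simp)]
  simp [pvUnesc_nil]

lemma pvUnesc_append_esc (x : List Char) : pvUnesc (x ++ ['\\', '|']) = pvUnesc x ++ ['|'] := by
  rw [pvUnesc_append _ (by simp), pvUnesc_pair]

lemma pvUnesc_append_char (c : Char) (hc : c ≠ '|') (x : List Char) :
    pvUnesc (x ++ [c]) = pvUnesc x ++ [c] := by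
  rw [pvUnesc_append _ (by simpa using hc), pvUnesc_single]

-- A's scanner produces exactly the unescapes of B's split pieces
lemma pvScan_eq_split : ∀ n (l acc : List Char), l.length ≤ n →
    (acc.getLast? = some '\\' → l.head? ≠ some '|') →
    pvA_scan l (pvUnesc acc) = (pvB_split l acc).map pvUnesc := by
  intro n
  induction n with
  | zero =>
      intro l acc h _
      have : l = [] := List.eq_nil_of_length_eq_zero (Nat.le_zero.mp h)
      subst this; simp [pvA_scan, pvB_split]
  | succ n ih =>
      intro l acc h hguard
      cases l with
      | nil => simp [pvA_scan, pvB_split]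
      | cons c rest =>
        rw [pvA_scan]
        by_cases hp : c = '\\' ∧ rest.head? = some '|'
        · -- escaped pipe: A consumes two chars, B keeps both in the piece
          obtain ⟨hc, hr⟩ := hp
          subst hc
          obtain ⟨r', rfl⟩ := pvHead hr
          rw [if_pos (by simp)]
          conv_rhs => rw [pvB_split]
          rw [if_neg (by simp)]
          conv_rhs => rw [pvB_split]
          rw [if_neg (by simp)]
          simp only [List.tail_cons, List.append_assoc]
          have h1 : pvUnesc acc ++ ['|'] = pvUnesc (acc ++ ['\\', '|']) :=
            (pvUnesc_append_esc acc).symm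
          rw [h1, ih r' (acc ++ ['\\', '|']) (by simp at h ⊢; omega)
            (by intro hlast; simp at hlast)]
          simp
        · rw [if_neg hp]
          by_cases hc : c = '|'
          · -- unescaped separator: both emit the piece
            subst hc
            have hl : acc.getLast? ≠ some '\\' := fun hl => hguard hl (by simp)
            rw [if_pos rfl]
            conv_rhs => rw [pvB_split]
            rw [if_pos ⟨rfl, hl⟩]
            simp only [List.map_cons]
            have hmap := ih rest [] (by simp at h ⊢; omega) (by simp)
            rw [pvUnesc_nil] at hmap
            rw [hmap]
          · -- ordinary character: both append it to the current piece
            rw [if_neg hc]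
            conv_rhs => rw [pvB_split]
            rw [if_neg (fun hn => hc hn.1)]
            rw [← pvUnesc_append_char c hc acc]
            rw [ih rest (acc ++ [c]) (by simp at h ⊢; omega)
                (by intro hlast
                    simp only [List.getLast?_append, List.getLast?_singleton,
                      Option.some_or, Option.some.injEq] at hlast
                    intro hh
                    exact hp ⟨hlast, hh⟩)]

-- the two-accumulator loop is an append of two maps
lemma pvA_loop_eq : ∀ (raws : List (List Char)) cells aligns,
    pvA_loop raws cells aligns =
      (cells ++ raws.map (fun r => (pvA_cell r).1), aligns ++ raws.map (fun r => (pvA_cell r).2)) := by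
  intro raws
  induction raws with
  | nil => intro cells aligns; simp [pvA_loop]
  | cons raw rest ih =>
      intro cells aligns
      rw [pvA_loop, ih]
      simp

lemma pvContains_false {y : Char} (h1 : y ≠ '^') (h2 : y ≠ '>') (h3 : y ≠ '<') :
    pvAlignChars.contains y = false := by
  simp [pvAlignChars, PySem.Dict.contains, PySem.Dict.ofList, PySem.Dict.update,
    PySem.Dict.empty, PySem.Dict.insert]
  exact ⟨fun h => absurd h h1.symm, fun h => absurd h h2.symm, fun h => absurd h h3.symm⟩

lemma pvEnds2 (t' : List Char) (x y a b : Char) :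
    PySem.Chars.endswith (t' ++ [x, y]) [a, b] = true ↔ (x = a ∧ y = b) := by
  simp only [PySem.Chars.endswith, List.isSuffixOf_iff_suffix]
  constructor
  · rintro ⟨r, hr⟩
    have h2 := (List.append_inj' hr (by simp)).2
    simp only [List.cons.injEq, and_true] at h2
    exact ⟨h2.1.symm, h2.2.symm⟩
  · rintro ⟨rfl, rfl⟩
    exact ⟨t', rfl⟩

lemma pvEnds1 (t : List Char) (y a : Char) :
    PySem.Chars.endswith (t ++ [y]) [a] = true ↔ y = a := by
  simp only [PySem.Chars.endswith, List.isSuffixOf_iff_suffix]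
  constructor
  · rintro ⟨r, hr⟩
    have h2 := (List.append_inj' hr (by simp)).2
    simpa using h2.symm
  · rintro rfl
    exact ⟨t, rfl⟩

-- A's index tests and B's endswith tests classify a stripped cell identically
lemma pvCell_eq (part : List Char) : pvB_cell part = pvA_cell (pvUnesc part) := by
  rw [pvB_cell, pvA_cell, pvReplace_eq_unesc]
  generalize PySem.Chars.strip (pvUnesc part) = s
  induction s using List.reverseRecOn with
  | nil => decide
  | append_singleton t y _ =>
    have hget1 : PySem.List.pyGet? (t ++ [y]) (-1) = some y := by
      simp [PySem.List.pyGet?, PySem.List.pyIdx?]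
    have hend1 : ∀ a : Char, PySem.Chars.endswith (t ++ [y]) [a] = true ↔ y = a := pvEnds1 t y
    induction t using List.reverseRecOn with
    | nil =>
      simp only [List.nil_append] at hget1 hend1 ⊢
      have hend2 : ∀ a b : Char, PySem.Chars.endswith [y] [a, b] = false := by
        intro a b
        rw [Bool.eq_false_iff]
        intro hcon
        have hsuf : [a, b] <:+ [y] := by
          simpa [PySem.Chars.endswith, List.isSuffixOf_iff_suffix] using hcon
        obtain ⟨r, hr⟩ := hsuf
        have := congrArg List.length hr
        simp at this
      rw [hend2, hend2, hend2]
      rw [if_neg (by simp)]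
      by_cases hy : y = '^' ∨ y = '>' ∨ y = '<'
      · rcases hy with rfl | rfl | rfl <;> decide
      · push_neg at hy
        rw [if_neg (show ¬ ((PySem.Chars.endswith [y] ['^'] || PySem.Chars.endswith [y] ['>']
              || PySem.Chars.endswith [y] ['<']) = true) from by
            intro hcon
            rcases Bool.or_eq_true_iff.mp hcon with hcon | h3
            · rcases Bool.or_eq_true_iff.mp hcon with h1 | h2
              · exact hy.1 ((hend1 '^').mp h1)
              · exact hy.2.1 ((hend1 '>').mp h2)
            · exact hy.2.2 ((hend1 '<').mp h3))]
        rw [if_neg (show ¬ (2 ≤ ([y] : List Char).length ∧ PySem.List.pyGet? [y] (-2) = some '\\'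
              ∧ pvAlignChars.contains ((PySem.List.pyGet? [y] (-1)).getD ' ') = true) from by
            rintro ⟨h2, -⟩; simp at h2)]
        rw [if_neg (show ¬ (([y] : List Char) ≠ []
              ∧ pvAlignChars.contains ((PySem.List.pyGet? [y] (-1)).getD ' ') = true) from by
            rintro ⟨-, hcon⟩
            rw [hget1] at hcon
            simp only [Option.getD_some] at hcon
            rw [pvContains_false hy.1 hy.2.1 hy.2.2] at hcon
            exact Bool.false_ne_true hcon)]
    | append_singleton t' x _ =>
      -- s = t' ++ [x, y]
      have hs : t' ++ [x] ++ [y] = t' ++ [x, y] := by simp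
      rw [hs] at hget1 hend1 ⊢
      have hget2 : PySem.List.pyGet? (t' ++ [x, y]) (-2) = some x := by
        simp only [PySem.List.pyGet?, PySem.List.pyIdx?]
        norm_num
        have h1 : t'.length + 2 - Int.toNat 2 = t'.length := by
          rw [show Int.toNat 2 = 2 from rfl]; omega
        simp only [h1]
        rw [List.getElem_append_right (by omega)]
        simp
      have hend2 : ∀ a b : Char, PySem.Chars.endswith (t' ++ [x, y]) [a, b] = true ↔ (x = a ∧ y = b) :=
        pvEnds2 t' x y
      by_cases hA : x = '\\' ∧ (y = '^' ∨ y = '>' ∨ y = '<')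
      · obtain ⟨rfl, hy⟩ := hA
        rw [if_pos (by rcases hy with rfl | rfl | rfl <;> simp [hend2]),
            if_pos (by
              refine ⟨by simp, by rw [hget2], ?_⟩
              rw [hget1]
              rcases hy with rfl | rfl | rfl <;> decide)]
      · rw [if_neg (show ¬ ((PySem.Chars.endswith (t' ++ [x, y]) ['\\', '^']
              || PySem.Chars.endswith (t' ++ [x, y]) ['\\', '>']
              || PySem.Chars.endswith (t' ++ [x, y]) ['\\', '<']) = true) from by
            intro hcon
            apply hA
            rcases Bool.or_eq_true_iff.mp hcon with hcon | h3
            · rcases Bool.or_eq_true_iff.mp hcon with h1 | h2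
              · have := (hend2 '\\' '^').mp h1; exact ⟨this.1, Or.inl this.2⟩
              · have := (hend2 '\\' '>').mp h2; exact ⟨this.1, Or.inr (Or.inl this.2)⟩
            · have := (hend2 '\\' '<').mp h3; exact ⟨this.1, Or.inr (Or.inr this.2)⟩)]
        by_cases hy : y = '^' ∨ y = '>' ∨ y = '<'
        · rw [if_pos (by rcases hy with rfl | rfl | rfl <;> simp [hend1])]
          rw [if_neg (show ¬ (2 ≤ (t' ++ [x, y]).length ∧ PySem.List.pyGet? (t' ++ [x, y]) (-2) = some '\\'
                ∧ pvAlignChars.contains ((PySem.List.pyGet? (t' ++ [x, y]) (-1)).getD ' ') = true) from by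
              rintro ⟨-, hx, -⟩
              rw [hget2] at hx
              exact hA ⟨by simpa using hx, hy⟩)]
          rw [if_pos (show (t' ++ [x, y]) ≠ []
                ∧ pvAlignChars.contains ((PySem.List.pyGet? (t' ++ [x, y]) (-1)).getD ' ') = true from by
              refine ⟨by simp, ?_⟩
              rw [hget1]
              rcases hy with rfl | rfl | rfl <;> decide)]
        · push_neg at hy
          rw [if_neg (show ¬ ((PySem.Chars.endswith (t' ++ [x, y]) ['^']
                || PySem.Chars.endswith (t' ++ [x, y]) ['>']
                || PySem.Chars.endswith (t' ++ [x, y]) ['<']) = true) from by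
              intro hcon
              rcases Bool.or_eq_true_iff.mp hcon with hcon | h3
              · rcases Bool.or_eq_true_iff.mp hcon with h1 | h2
                · exact hy.1 ((hend1 '^').mp h1)
                · exact hy.2.1 ((hend1 '>').mp h2)
              · exact hy.2.2 ((hend1 '<').mp h3))]
          rw [if_neg (show ¬ (2 ≤ (t' ++ [x, y]).length ∧ PySem.List.pyGet? (t' ++ [x, y]) (-2) = some '\\'
                ∧ pvAlignChars.contains ((PySem.List.pyGet? (t' ++ [x, y]) (-1)).getD ' ') = true) from by
              rintro ⟨-, -, hcon⟩
              rw [hget1] at hcon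
              simp only [Option.getD_some] at hcon
              rw [pvContains_false hy.1 hy.2.1 hy.2.2] at hcon
              exact Bool.false_ne_true hcon)]
          rw [if_neg (show ¬ ((t' ++ [x, y]) ≠ []
                ∧ pvAlignChars.contains ((PySem.List.pyGet? (t' ++ [x, y]) (-1)).getD ' ') = true) from by
              rintro ⟨-, hcon⟩
              rw [hget1] at hcon
              simp only [Option.getD_some] at hcon
              rw [pvContains_false hy.1 hy.2.1 hy.2.2] at hcon
              exact Bool.false_ne_true hcon)]

-- ===== VERDICT (by name: the statement is the Claim_ definition above) =====
theorem parse_table_cells_py_spec : Claim_equal_parse_table_cells_py := by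
  intro line _
  unfold Spec_parse_table_cells_py parse_table_cells_py parse_table_cells_py_alt
  have h0 : pvUnesc [] = [] := by rw [pvUnesc]
  have hsplit : pvA_scan line.toList [] = (pvB_split line.toList []).map pvUnesc := by
    have := pvScan_eq_split line.toList.length line.toList [] le_rfl (by simp)
    rwa [h0] at this
  rw [hsplit, pvA_loop_eq]
  simp only [List.nil_append, List.map_map]
  congr 1 <;>
    · apply List.map_congr_left
      intro r _
      simp [Function.comp, pvCell_eq]
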